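-- pv_equiv track=rewrite | github.com/nbaskar1/Workout_Problems | find_last_substring.py | findLastSubstring
-- ===== SOURCE A (Python) =====
-- def findLastSubstring(string):
--     max_idx = 0
--     max_val = 0
--     for idx, char in enumerate(string):
--         if ord(char) > max_val:
--             max_val = ord(char)
--             max_idx = idx
--
--     return (string[max_idx:])
-- ===== SOURCE B (Python) =====
-- def findLastSubstring(string):
--     # Divide and conquer: the answer for the whole string is the left half's
--     # answer extended by the right half when its head (the left half's max, with
--     # ties going left) is >= the right half's head, else the right half's answer.
--     if len(string) <= 1:
--         return string
--     mid = len(string) // 2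
--     left = findLastSubstring(string[:mid])
--     right = findLastSubstring(string[mid:])
--     if left[0] >= right[0]:
--         return left + string[mid:]
--     else:
--         return right
-- ===== Notes on version B (the rewrite author's own statement) =====
-- stated objective: alternative
-- what changed: Replaces A's single left-to-right scan tracking a running max ord and its index with a divide-and-conquer recursion: solve each half of the string, then combine by comparing the heads of the two half-answers (>= ties go left, preserving first occurrence), extending the left answer across the right half when it wins.
import Mathlib
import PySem

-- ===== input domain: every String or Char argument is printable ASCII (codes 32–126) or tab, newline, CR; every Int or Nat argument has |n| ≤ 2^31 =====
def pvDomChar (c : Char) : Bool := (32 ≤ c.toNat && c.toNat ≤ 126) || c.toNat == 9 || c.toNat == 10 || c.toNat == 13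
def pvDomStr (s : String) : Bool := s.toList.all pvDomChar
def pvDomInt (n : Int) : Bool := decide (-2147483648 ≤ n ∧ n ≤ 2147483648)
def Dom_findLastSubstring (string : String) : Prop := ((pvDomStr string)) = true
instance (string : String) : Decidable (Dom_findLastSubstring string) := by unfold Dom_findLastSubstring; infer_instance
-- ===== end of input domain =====

-- B replaces A's single left-to-right scan (running max ord + its index) with a
-- divide-and-conquer recursion on string halves — a different decomposition, same O-class.


-- ===== PORT A =====
def findLastSubstring (string : String) : String :=
  let st := (PySem.List.enumerate string.toList 0).foldl
    (fun (st : Int × Int) p =>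
      if (p.2.toNat : Int) > st.2 then (p.1, (p.2.toNat : Int)) else st)
    (0, 0)
  String.ofList (PySem.List.slice string.toList (some st.1) none)

-- ===== PORT B =====
-- recursion of Source B on the character list; len(string)//2 on the nonnegative
-- length is Nat division, string[:mid]/string[mid:] are PySem slices
def flsGo (l : List Char) : List Char :=
  if l.length ≤ 1 then l
  else
    let mid : Nat := l.length / 2
    let lft := flsGo (PySem.List.slice l none (some (mid : Int)))
    let rgt := flsGo (PySem.List.slice l (some (mid : Int)) none)
    match lft.head?, rgt.head? with
    | some a, some b => if b ≤ a then lft ++ PySem.List.slice l (some (mid : Int)) none else rgt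
    | _, _ => rgt   -- unreachable: both halves are nonempty
termination_by l.length
decreasing_by
  · simp only [PySem.List.slice_to_natCast, List.length_take]; omega
  · simp only [PySem.List.slice_from_natCast, List.length_drop]; omega

def findLastSubstring_alt (string : String) : String :=
  String.ofList (flsGo string.toList)

-- ===== PRECONDITION & SPEC =====
def Spec_findLastSubstring (string : String) (out : String) : Prop := out = findLastSubstring_alt string
instance (string : String) (out : String) : Decidable (Spec_findLastSubstring string out) := by unfold Spec_findLastSubstring; infer_instance

-- ===== CLAIM (what is proved, stated in full; the proofs are below) =====
def Claim_equal_findLastSubstring : Prop := ∀ (string : String), Dom_findLastSubstring string → Spec_findLastSubstring string (findLastSubstring string)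

-- ===== LEMMAS AND PROOFS =====

/-- First index/value of the first maximal character strictly above threshold `v`
(what A's running-max loop computes). -/
def fmAbove (v : Int) : List Char → Option (Nat × Char)
  | [] => none
  | c :: t =>
    if (c.toNat : Int) > v then
      match fmAbove (c.toNat : Int) t with
      | none => some (0, c)
      | some (j, m) => some (j + 1, m)
    else (fmAbove v t).map (fun p => (p.1 + 1, p.2))

theorem le_of_fmAbove_none (v : Int) (l : List Char) (h : fmAbove v l = none) :
    ∀ c ∈ l, (c.toNat : Int) ≤ v := by
  induction l generalizing v with
  | nil => simp
  | cons c t ih =>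
    simp only [fmAbove] at h
    by_cases hc : (c.toNat : Int) > v
    · rw [if_pos hc] at h
      rcases hfm : fmAbove (c.toNat : Int) t with _ | ⟨j, m⟩ <;> rw [hfm] at h <;> simp at h
    · rw [if_neg hc] at h
      rcases hfm : fmAbove v t with _ | ⟨j, m⟩
      · intro d hd
        rcases List.mem_cons.mp hd with h1 | h1
        · subst h1; omega
        · exact ih v hfm d h1
      · rw [hfm] at h; simp at h

theorem fmAbove_cons_isSome (v : Int) (c : Char) (t : List Char)
    (h : (c.toNat : Int) > v) : (fmAbove v (c :: t)).isSome := by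
  simp only [fmAbove, if_pos h]
  rcases fmAbove (c.toNat : Int) t with _ | ⟨j, m⟩ <;> simp

theorem fold_eq_fmAbove (l : List Char) (s i v : Int) :
    (PySem.List.enumerate l s).foldl
      (fun (st : Int × Int) p =>
        if (p.2.toNat : Int) > st.2 then (p.1, (p.2.toNat : Int)) else st)
      (i, v)
    = match fmAbove v l with
      | none => (i, v)
      | some (j, m) => (s + (j : Int), (m.toNat : Int)) := by
  induction l generalizing s i v with
  | nil => rfl
  | cons c t ih =>
    rw [PySem.List.enumerate_cons, List.foldl_cons]
    by_cases hc : (c.toNat : Int) > v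
    · rcases hfm : fmAbove (c.toNat : Int) t with _ | ⟨j, m⟩ <;>
        simp [fmAbove, hc, hfm, ih] <;> omega
    · rcases hfm : fmAbove v t with _ | ⟨j, m⟩ <;>
        simp [fmAbove, hc, hfm, ih] <;> omega

theorem char_lt_of_toNat_lt {c d : Char} (h : c.toNat < d.toNat) : c < d := h

theorem char_le_of_toNat_le {c d : Char} (h : c.toNat ≤ d.toNat) : c ≤ d := h

theorem fmAbove_spec (l : List Char) (v : Int) (j : Nat) (m : Char)
    (h : fmAbove v l = some (j, m)) :
    m ∈ l ∧ v < (m.toNat : Int) ∧ (∀ c ∈ l, c ≤ m) ∧ PySem.List.index? l m = some j := by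
  induction l generalizing v j m with
  | nil => simp [fmAbove] at h
  | cons c t ih =>
    simp only [fmAbove] at h
    by_cases hc : (c.toNat : Int) > v
    · rw [if_pos hc] at h
      rcases hfm : fmAbove (c.toNat : Int) t with _ | ⟨j', m'⟩
      · rw [hfm] at h
        obtain ⟨hj, hm⟩ : 0 = j ∧ c = m := by simpa using h
        subst hj; subst hm
        refine ⟨List.mem_cons_self .., hc, ?_, PySem.List.index?_cons_self ..⟩
        intro d hd
        rcases List.mem_cons.mp hd with h1 | h1
        · exact le_of_eq h1
        · have := le_of_fmAbove_none _ _ hfm d h1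
          exact char_le_of_toNat_le (by omega)
      · rw [hfm] at h
        obtain ⟨hj, hm⟩ : j' + 1 = j ∧ m' = m := by simpa using h
        obtain ⟨hmem, hv, hmax, hidx⟩ := ih (c.toNat : Int) j' m' hfm
        rw [hm] at hmem hv hmax hidx
        have hcm : c < m := char_lt_of_toNat_lt (by omega)
        refine ⟨List.mem_cons_of_mem _ hmem, by omega, ?_, ?_⟩
        · intro d hd
          rcases List.mem_cons.mp hd with h1 | h1
          · exact h1 ▸ le_of_lt hcm
          · exact hmax d h1
        · rw [PySem.List.index?_cons_of_ne t (ne_of_lt hcm), hidx, ← hj]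
          rfl
    · rw [if_neg hc] at h
      rcases hfm : fmAbove v t with _ | ⟨j', m'⟩
      · rw [hfm] at h; simp at h
      · rw [hfm] at h
        obtain ⟨hj, hm⟩ : j' + 1 = j ∧ m' = m := by simpa using h
        obtain ⟨hmem, hv, hmax, hidx⟩ := ih v j' m' hfm
        rw [hm] at hmem hv hmax hidx
        have hcm : c < m := char_lt_of_toNat_lt (by omega)
        refine ⟨List.mem_cons_of_mem _ hmem, hv, ?_, ?_⟩
        · intro d hd
          rcases List.mem_cons.mp hd with h1 | h1
          · exact h1 ▸ le_of_lt hcm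
          · exact hmax d h1
        · rw [PySem.List.index?_cons_of_ne t (ne_of_lt hcm), hidx, ← hj]
          rfl

/-- What Source B's divide-and-conquer computes: the suffix starting at the first
occurrence of the maximal character. -/
theorem flsGo_spec : ∀ (n : Nat) (l : List Char), l.length ≤ n → l ≠ [] →
    ∃ j m, j < l.length ∧ flsGo l = l.drop j ∧ m ∈ l ∧ (∀ c ∈ l, c ≤ m) ∧
      PySem.List.index? l m = some j ∧ (l.drop j).head? = some m := by
  intro n
  induction n with
  | zero =>
    intro l hlen hne
    exact absurd (List.eq_nil_of_length_eq_zero (Nat.le_zero.mp hlen)) hne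
  | succ n ih =>
    intro l hlen hne
    by_cases h1 : l.length ≤ 1
    · -- singleton
      rcases l with _ | ⟨c, t⟩
      · exact absurd rfl hne
      · have ht : t = [] := by
          have := List.length_cons (a := c) (as := t) ▸ h1
          exact List.eq_nil_of_length_eq_zero (by omega)
        subst ht
        refine ⟨0, c, by simp, ?_, by simp, by simp, PySem.List.index?_cons_self .., by simp⟩
        rw [flsGo]; simp
    · -- split case
      have hlen2 : 2 ≤ l.length := by omega
      set mid : Nat := l.length / 2 with hmid
      have hmid1 : 1 ≤ mid := by omega
      have hmidlt : mid < l.length := by omega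
      set L := l.take mid with hL
      set R := l.drop mid with hR
      have hLlen : L.length = mid := by simp [hL]; omega
      have hRlen : R.length = l.length - mid := by simp [hR]
      have hLne : L ≠ [] := by
        intro h; rw [h] at hLlen; simp at hLlen; omega
      have hRne : R ≠ [] := by
        intro h; rw [h] at hRlen; simp at hRlen; omega
      obtain ⟨j1, m1, hj1, hd1, hm1mem, hmax1, hidx1, hh1⟩ :=
        ih L (by omega) hLne
      obtain ⟨j2, m2, hj2, hd2, hm2mem, hmax2, hidx2, hh2⟩ :=
        ih R (by omega) hRne
      have hsplit : L ++ R = l := List.take_append_drop mid l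
      have hunfold : flsGo l =
          match (flsGo L).head?, (flsGo R).head? with
          | some a, some b => if b ≤ a then flsGo L ++ R else flsGo R
          | _, _ => flsGo R := by
        rw [flsGo]
        simp only [if_neg h1, PySem.List.slice_to_natCast, PySem.List.slice_from_natCast,
          ← hmid, ← hL, ← hR]
      have hhead1 : (flsGo L).head? = some m1 := by rw [hd1]; exact hh1
      have hhead2 : (flsGo R).head? = some m2 := by rw [hd2]; exact hh2
      rw [hhead1, hhead2] at hunfold
      rw [show (match some m1, some m2 with
            | some a, some b => if b ≤ a then flsGo L ++ R else flsGo R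
            | _, _ => flsGo R) = if m2 ≤ m1 then flsGo L ++ R else flsGo R from rfl] at hunfold
      by_cases hcmp : m2 ≤ m1
      · -- left wins
        have hj1mid : j1 < mid := hLlen ▸ hj1
        refine ⟨j1, m1, by omega, ?_, ?_, ?_, ?_, ?_⟩
        · -- flsGo l = l.drop j1
          rw [hunfold, if_pos hcmp, hd1, ← hsplit,
            List.drop_append_of_le_length (by omega)]
        · exact List.mem_of_mem_take hm1mem
        · intro c hc
          rcases (List.mem_append.mp (hsplit ▸ hc)) with h | h
          · exact hmax1 c h
          · exact le_trans (hmax2 c h) hcmp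
        · rw [← hsplit, PySem.List.index?_append_of_mem R hm1mem]
          exact hidx1
        · rw [← hsplit, List.drop_append_of_le_length (by omega), List.head?_append, hh1]
          rfl
      · -- right wins
        have hm12 : m1 < m2 := lt_of_not_ge hcmp
        have hj2R : j2 < R.length := hj2
        refine ⟨mid + j2, m2, by omega, ?_, ?_, ?_, ?_, ?_⟩
        · rw [hunfold, if_neg hcmp, hd2, hR, List.drop_drop]
        · exact hsplit ▸ List.mem_append_right L hm2mem
        · intro c hc
          rcases (List.mem_append.mp (hsplit ▸ hc)) with h | h
          · exact le_trans (hmax1 c h) (le_of_lt hm12)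
          · exact hmax2 c h
        · -- index in the concatenation: m2 is not in L
          have hnotL : m2 ∉ L := fun h => absurd (hmax1 m2 h) (by exact hcmp)
          obtain ⟨pre, suf, hRsplit, hprelen, hpre⟩ :=
            (PySem.List.index?_eq_some_iff R m2 j2).mp hidx2
          rw [← hsplit, hRsplit, ← List.append_assoc]
          refine (PySem.List.index?_eq_some_iff _ m2 (mid + j2)).mpr
            ⟨L ++ pre, suf, rfl, by simp [hLlen, hprelen], ?_⟩
          intro h
          rcases List.mem_append.mp h with h | h
          · exact hnotL h
          · exact hpre h
        · rw [← List.drop_drop, ← hR]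
          exact hh2

-- ===== VERDICT (by name: the statement is the Claim_ definition above) =====
theorem findLastSubstring_spec : Claim_equal_findLastSubstring := by
  intro string hdom
  unfold Spec_findLastSubstring findLastSubstring findLastSubstring_alt
  rcases hl : string.toList with _ | ⟨c, t⟩
  · rw [flsGo]; rfl
  · -- the head char is in Dom, so its code is positive and A's loop fires
    have hc0 : (0 : Int) < (c.toNat : Int) := by
      have hall := List.all_eq_true.mp hdom c (by rw [hl]; exact List.mem_cons_self ..)
      simp only [pvDomChar, Bool.or_eq_true, Bool.and_eq_true, decide_eq_true_eq,
        beq_iff_eq] at hall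
      omega
    have hsome := fmAbove_cons_isSome 0 c t hc0
    rcases hfm : fmAbove 0 (c :: t) with _ | ⟨jA, mA⟩
    · rw [hfm] at hsome; simp at hsome
    obtain ⟨hmemA, _, hmaxA, hidxA⟩ := fmAbove_spec _ _ _ _ hfm
    obtain ⟨jB, mB, hjB, hdB, hmemB, hmaxB, hidxB, _⟩ :=
      flsGo_spec (c :: t).length (c :: t) le_rfl (by simp)
    have hmm : mA = mB := le_antisymm (hmaxB mA hmemA) (hmaxA mB hmemB)
    have hjj : jA = jB := by
      rw [hmm] at hidxA
      exact Option.some.inj (hidxA.symm.trans hidxB)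
    rw [fold_eq_fmAbove (c :: t) 0 0 0, hfm]
    rw [hdB, ← hjj]
    simp [PySem.List.slice_from_natCast]
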